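-- pv_equiv track=rewrite | github.com/jvlmdr/aoc-py-2023 | day03/part1.py | find_numbers
-- ===== SOURCE A (Python) =====
-- def find_numbers(value):
--     out = []
--     start = None
--     curr = 0
--     for i, x in enumerate(value):
--         if x >= 0:
--             if start is None:
--                 start = i
--                 curr = x
--             else:
--                 curr = curr * 10 + x
--         else:
--             if start is not None:
--                 out.append((start, i, curr))
--             start = None
--     if start is not None:
--         out.append((start, len(value), curr))
--     return out
-- ===== SOURCE B (Python) =====
-- def find_numbers(value):
--     # Two-level scan: outer index walk; on a non-negative cell, consume the
--     # whole run at once (takeWhile-style) and emit its span and value.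
--     out = []
--     n = len(value)
--     i = 0
--     while i < n:
--         if value[i] >= 0:
--             j = i
--             num = 0
--             while j < n and value[j] >= 0:
--                 num = num * 10 + value[j]
--                 j += 1
--             out.append((i, j, num))
--             i = j
--         else:
--             i += 1
--     return out
-- ===== Notes on version B (the rewrite author's own statement) =====
-- stated objective: alternative
-- what changed: Replaces the start/None state machine carrying pending (start, curr) across iterations with a run-at-a-time scan: when a non-negative cell is found, an inner takeWhile-style loop consumes the whole run and emits its (start, end, number) immediately, so no Optional state or end-of-loop flush is needed.
import Mathlib
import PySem

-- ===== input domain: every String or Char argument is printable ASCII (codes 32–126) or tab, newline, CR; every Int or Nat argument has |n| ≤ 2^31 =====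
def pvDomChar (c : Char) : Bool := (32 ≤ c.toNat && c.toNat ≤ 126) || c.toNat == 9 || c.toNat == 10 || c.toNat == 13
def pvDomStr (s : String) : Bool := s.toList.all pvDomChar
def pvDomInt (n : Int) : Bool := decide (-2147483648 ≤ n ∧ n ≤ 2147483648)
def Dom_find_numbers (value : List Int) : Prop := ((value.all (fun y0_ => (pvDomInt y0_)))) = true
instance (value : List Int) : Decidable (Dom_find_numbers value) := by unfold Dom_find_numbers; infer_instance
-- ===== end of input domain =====

-- B replaces A's start/None state machine by a run-at-a-time scan (objective: alternative decomposition, same cost).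

-- ===== PORT A =====
-- literal transliteration of A: fold over enumerate with state (out, start : Option Int, curr)
def find_numbers (value : List Int) : List (Int × Int × Int) :=
  let st := (PySem.List.enumerate value 0).foldl
    (fun (s : List (Int × Int × Int) × Option Int × Int) (p : Int × Int) =>
      match s, p with
      | (out, start, curr), (i, x) =>
        if 0 ≤ x then
          match start with
          | none => (out, some i, x)
          | some _ => (out, start, curr * 10 + x)
        else
          match start with
          | some s0 => (out ++ [(s0, i, curr)], none, curr)
          | none => (out, none, curr))
    ([], none, 0)
  match st with
  | (out, some s0, curr) => out ++ [(s0, (value.length : Int), curr)]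
  | (out, none, _) => out

-- ===== PORT B =====
-- Source B's outer while loop: on a non-negative cell consume the whole run (inner while = takeWhile/fold), else step by one
def findNumbersAltGo : List Int → Int → List (Int × Int × Int)
  | [], _ => []
  | x :: rest, i =>
    if h : 0 ≤ x then
      let run := (x :: rest).takeWhile (fun y => decide (0 ≤ y))
      (i, i + (run.length : Int), run.foldl (fun a d => a * 10 + d) 0)
        :: findNumbersAltGo ((x :: rest).dropWhile (fun y => decide (0 ≤ y))) (i + (run.length : Int))
    else
      findNumbersAltGo rest (i + 1)
termination_by l _ => l.length
decreasing_by
  · simp only [List.dropWhile_cons, h, decide_true, if_true]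
    exact Nat.lt_succ_of_le (List.length_dropWhile_le _ _)
  · simp

def find_numbers_alt (value : List Int) : List (Int × Int × Int) :=
  findNumbersAltGo value 0

-- ===== PRECONDITION & SPEC =====
def Spec_find_numbers (value : List Int) (out : List (Int × Int × Int)) : Prop := out = find_numbers_alt value
instance (value : List Int) (out : List (Int × Int × Int)) : Decidable (Spec_find_numbers value out) := by unfold Spec_find_numbers; infer_instance

-- ===== CLAIM (what is proved, stated in full; the proofs are below) =====
def Claim_equal_find_numbers : Prop := ∀ (value : List Int), Dom_find_numbers value → Spec_find_numbers value (find_numbers value)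

-- ===== LEMMAS AND PROOFS =====

-- A's loop body, named for the proofs (definitionally the lambda in find_numbers)
def fnStepA (s : List (Int × Int × Int) × Option Int × Int) (p : Int × Int) :
    List (Int × Int × Int) × Option Int × Int :=
  match s, p with
  | (out, start, curr), (i, x) =>
    if 0 ≤ x then
      match start with
      | none => (out, some i, x)
      | some _ => (out, start, curr * 10 + x)
    else
      match start with
      | some s0 => (out ++ [(s0, i, curr)], none, curr)
      | none => (out, none, curr)

-- A's end-of-loop flush, with the final index n as a parameter
def fnFinish (n : Int) (st : List (Int × Int × Int) × Option Int × Int) : List (Int × Int × Int) :=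
  match st with
  | (out, some s0, curr) => out ++ [(s0, n, curr)]
  | (out, none, _) => out

lemma altGo_cons_pos (x : Int) (rest : List Int) (i : Int) (hx : 0 ≤ x) :
    findNumbersAltGo (x :: rest) i =
      (i, i + (((x :: rest).takeWhile (fun y => decide (0 ≤ y))).length : Int),
        ((x :: rest).takeWhile (fun y => decide (0 ≤ y))).foldl (fun a d => a * 10 + d) 0)
        :: findNumbersAltGo ((x :: rest).dropWhile (fun y => decide (0 ≤ y)))
            (i + (((x :: rest).takeWhile (fun y => decide (0 ≤ y))).length : Int)) := by
  rw [findNumbersAltGo]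
  simp [hx]

lemma altGo_cons_neg (x : Int) (rest : List Int) (i : Int) (hx : ¬ 0 ≤ x) :
    findNumbersAltGo (x :: rest) i = findNumbersAltGo rest (i + 1) := by
  rw [findNumbersAltGo]
  simp [hx]

lemma fn_main (l : List Int) :
    (∀ (i : Int) (out : List (Int × Int × Int)) (c : Int),
      fnFinish (i + l.length) ((PySem.List.enumerate l i).foldl fnStepA (out, none, c))
        = out ++ findNumbersAltGo l i) ∧
    (∀ (i : Int) (out : List (Int × Int × Int)) (s c : Int),
      fnFinish (i + l.length) ((PySem.List.enumerate l i).foldl fnStepA (out, some s, c))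
        = out ++ (s, i + ((l.takeWhile (fun y => decide (0 ≤ y))).length : Int),
                  (l.takeWhile (fun y => decide (0 ≤ y))).foldl (fun a d => a * 10 + d) c)
              :: findNumbersAltGo (l.dropWhile (fun y => decide (0 ≤ y)))
                   (i + ((l.takeWhile (fun y => decide (0 ≤ y))).length : Int))) := by
  induction l with
  | nil =>
    constructor
    · intro i out c
      simp [PySem.List.enumerate_nil, fnFinish, findNumbersAltGo]
    · intro i out s c
      simp [PySem.List.enumerate_nil, fnFinish, findNumbersAltGo]
  | cons x rest ih =>
    obtain ⟨ihN, ihS⟩ := ih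
    have hlen : ∀ i : Int, i + (((x :: rest).length : Nat) : Int) = (i + 1) + (rest.length : Int) := by
      intro i; push_cast [List.length_cons]; ring
    constructor
    · intro i out c
      rw [PySem.List.enumerate_cons]
      by_cases hx : 0 ≤ x
      · have hstep : fnStepA (out, none, c) (i, x) = (out, some i, x) := by
          simp [fnStepA, hx]
        rw [List.foldl_cons, hstep, hlen i, ihS (i + 1) out i x,
          altGo_cons_pos x rest i hx]
        simp only [List.takeWhile_cons, List.dropWhile_cons, hx, decide_true, if_true,
          List.length_cons, List.foldl_cons]
        have h0 : (0 : Int) * 10 + x = x := by ring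
        rw [h0]
        push_cast
        have e : i + (((rest.takeWhile (fun y => decide (0 ≤ y))).length : Int) + 1)
            = i + 1 + ((rest.takeWhile (fun y => decide (0 ≤ y))).length : Int) := by ring
        rw [e]
      · have hstep : fnStepA (out, none, c) (i, x) = (out, none, c) := by
          simp [fnStepA, hx]
        rw [List.foldl_cons, hstep, hlen i, ihN (i + 1) out c,
          altGo_cons_neg x rest i hx]
    · intro i out s c
      rw [PySem.List.enumerate_cons]
      by_cases hx : 0 ≤ x
      · have hstep : fnStepA (out, some s, c) (i, x) = (out, some s, c * 10 + x) := by
          simp [fnStepA, hx]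
        rw [List.foldl_cons, hstep, hlen i, ihS (i + 1) out s (c * 10 + x)]
        simp only [List.takeWhile_cons, List.dropWhile_cons, hx, decide_true, if_true,
          List.length_cons, List.foldl_cons]
        push_cast
        have e : i + (((rest.takeWhile (fun y => decide (0 ≤ y))).length : Int) + 1)
            = i + 1 + ((rest.takeWhile (fun y => decide (0 ≤ y))).length : Int) := by ring
        rw [e]
      · have hstep : fnStepA (out, some s, c) (i, x) = (out ++ [(s, i, c)], none, c) := by
          simp [fnStepA, hx]
        rw [List.foldl_cons, hstep, hlen i, ihN (i + 1) (out ++ [(s, i, c)]) c]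
        simp [hx, altGo_cons_neg x rest i hx]

-- ===== VERDICT (by name: the statement is the Claim_ definition above) =====
theorem find_numbers_spec : Claim_equal_find_numbers := by
  intro value _
  show find_numbers value = find_numbers_alt value
  have h := (fn_main value).1 0 [] 0
  simpa [find_numbers, find_numbers_alt, fnFinish, fnStepA] using h
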